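-- pv_equiv track=rewrite | github.com/shreenandansonu/codechef | new.py | isap
-- ===== SOURCE A (Python) =====
-- def isap(sequ):
--     n = len(sequ)
--     isAPFree = True
--
--
--     for i in range(n - 2):
--         for j in range(i + 1, n - 1):
--             for k in range(j + 1, n):
--                 if (sequ[j] - sequ[i]) == (sequ[k] - sequ[j]):
--                     isAPFree = False
--                     break
--
--     return isAPFree
-- ===== SOURCE B (Python) =====
-- def isap(sequ):
--     seen = set()
--     n = len(sequ)
--     for j in range(n):
--         x = sequ[j]
--         for k in range(j + 1, n):
--             if 2 * x - sequ[k] in seen: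
--                 return False
--         seen.add(x)
--     return True
-- ===== Notes on version B (the rewrite author's own statement) =====
-- stated objective: faster
-- what changed: Replaced A's triple nested index loop over all (i,j,k) by a single left-to-right scan that, for each middle element x, hash-tests the required left value 2*x - right against a set of already-seen elements, with an early return on the first hit.
import Mathlib
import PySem

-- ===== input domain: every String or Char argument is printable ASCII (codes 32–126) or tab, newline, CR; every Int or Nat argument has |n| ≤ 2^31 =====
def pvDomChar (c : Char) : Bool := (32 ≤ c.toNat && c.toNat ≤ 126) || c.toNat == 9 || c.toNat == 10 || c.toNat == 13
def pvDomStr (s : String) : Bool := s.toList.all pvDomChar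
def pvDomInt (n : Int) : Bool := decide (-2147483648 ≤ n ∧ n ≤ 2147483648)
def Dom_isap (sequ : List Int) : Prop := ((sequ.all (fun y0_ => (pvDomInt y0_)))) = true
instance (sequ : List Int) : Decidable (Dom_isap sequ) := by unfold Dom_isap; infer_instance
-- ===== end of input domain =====

-- B replaces A's cubic triple loop by a quadratic scan: for each middle element x it
-- tests the needed left value 2*x - right against a hash set of already-seen elements.

-- ===== PORT A =====
-- inner k-loop of A: 'break' on the first match returns false immediately
def kloopA (sequ : List Int) (i j : Nat) (flag : Bool) : List Nat → Bool
  | [] => flag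
  | k :: ks =>
      if sequ.getD j 0 - sequ.getD i 0 == sequ.getD k 0 - sequ.getD j 0 then false
      else kloopA sequ i j flag ks

def isap (sequ : List Int) : Bool :=
  let n := sequ.length
  (List.range (n - 2)).foldl (fun flag i =>
    (List.range' (i + 1) (n - 1 - (i + 1))).foldl (fun flag j =>
      kloopA sequ i j flag (List.range' (j + 1) (n - (j + 1)))) flag) true

-- ===== PORT B =====
-- one step per middle element x: the inner 'return False on first hit' loop is List.any;
-- afterwards x joins the seen-set
def bLoop (seen : PySem.Set Int) : List Int → Bool
  | [] => true
  | x :: rest =>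
      if rest.any (fun y => PySem.Set.contains seen (2 * x - y)) then false
      else bLoop (PySem.Set.add seen x) rest

def isap_alt (sequ : List Int) : Bool := bLoop PySem.Set.empty sequ

-- ===== PRECONDITION & SPEC =====
def Spec_isap (sequ : List Int) (out : Bool) : Prop := out = isap_alt sequ
instance (sequ : List Int) (out : Bool) : Decidable (Spec_isap sequ out) := by unfold Spec_isap; infer_instance

-- ===== CLAIM (what is proved, stated in full; the proofs are below) =====
def Claim_equal_isap : Prop := ∀ (sequ : List Int), Dom_isap sequ → Spec_isap sequ (isap sequ)

-- ===== LEMMAS AND PROOFS =====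

-- the shared specification: some ordered 3-term arithmetic progression exists
def HasAP (s : List Int) : Prop :=
  ∃ i j k, i < j ∧ j < k ∧ k < s.length ∧
    s.getD j 0 - s.getD i 0 = s.getD k 0 - s.getD j 0

theorem kloopA_eq (sequ : List Int) (i j : Nat) (flag : Bool) (ks : List Nat) :
    kloopA sequ i j flag ks =
      if ks.any (fun k => sequ.getD j 0 - sequ.getD i 0 == sequ.getD k 0 - sequ.getD j 0)
      then false else flag := by
  induction ks with
  | nil => simp [kloopA]
  | cons k ks ih =>
      simp only [kloopA, List.any_cons, ih]
      by_cases h : (sequ.getD j 0 - sequ.getD i 0 == sequ.getD k 0 - sequ.getD j 0) = true <;>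
        simp [Bool.and_assoc]

theorem foldl_guard {α : Type} (p : α → Bool) (l : List α) (b : Bool) :
    l.foldl (fun flag a => if p a then false else flag) b = (!l.any p && b) := by
  induction l generalizing b with
  | nil => simp
  | cons a l ih =>
      simp only [List.foldl_cons, List.any_cons, ih]
      by_cases h : p a = true <;> simp [h]

theorem foldl_and {α : Type} (g : α → Bool) (l : List α) (b : Bool) :
    l.foldl (fun flag a => (g a && flag)) b = (l.all g && b) := by
  induction l generalizing b with
  | nil => simp
  | cons a l ih =>
      simp only [List.foldl_cons, List.all_cons, ih]
      by_cases h : g a = true <;> simp [h]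

theorem isap_eq_true_iff (sequ : List Int) : isap sequ = true ↔ ¬ HasAP sequ := by
  unfold isap HasAP
  simp only [kloopA_eq, foldl_guard, foldl_and, Bool.and_true, List.all_eq_true,
    Bool.not_eq_eq_eq_not, Bool.not_true, List.any_eq_false, List.any_eq_true,
    List.mem_range, List.mem_range'_1, beq_iff_eq, not_exists, not_and]
  constructor
  · intro h i j k hij hjk hk heq
    exact h i (by omega) j ⟨by omega, by omega⟩ k ⟨by omega, by omega⟩ heq
  · intro h i _hi j hj k hk heq
    exact h i j k (by omega) (by omega) (by omega) heq

-- what B's loop looks for, parameterised by the seen-set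
def ExAP (l : List Int) (seen : PySem.Set Int) : Prop :=
  ∃ j k, j < k ∧ k < l.length ∧
    (2 * l.getD j 0 - l.getD k 0 ∈ seen ∨
      ∃ i, i < j ∧ l.getD i 0 = 2 * l.getD j 0 - l.getD k 0)

theorem any_getD {p : Int → Prop} (l : List Int) :
    (∃ y ∈ l, p y) ↔ ∃ k, k < l.length ∧ p (l.getD k 0) := by
  constructor
  · rintro ⟨y, hy, hp⟩
    obtain ⟨k, hk, rfl⟩ := List.mem_iff_getElem.mp hy
    exact ⟨k, hk, by rwa [List.getD_eq_getElem _ _ hk]⟩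
  · rintro ⟨k, hk, hp⟩
    exact ⟨l.getD k 0, by rw [List.getD_eq_getElem _ _ hk]; exact List.getElem_mem hk, hp⟩

theorem ExAP_cons (x : Int) (rest : List Int) (seen : PySem.Set Int) :
    ExAP (x :: rest) seen ↔
      (∃ k, k < rest.length ∧ 2 * x - rest.getD k 0 ∈ seen) ∨
        ExAP rest (PySem.Set.add seen x) := by
  constructor
  · rintro ⟨j, k, hjk, hk, hcond⟩
    match j, k with
    | 0, k + 1 =>
        left
        refine ⟨k, by simpa using hk, ?_⟩
        rcases hcond with hmem | ⟨i, hi, _⟩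
        · simpa using hmem
        · omega
    | j + 1, k + 1 =>
        right
        refine ⟨j, k, by omega, by simpa using hk, ?_⟩
        rcases hcond with hmem | ⟨i, hi, heq⟩
        · left; rw [PySem.Set.mem_add]; left; simpa using hmem
        · match i with
          | 0 =>
              left; rw [PySem.Set.mem_add]; right
              simp only [List.getD_cons_zero, List.getD_cons_succ] at heq
              exact heq.symm
          | i + 1 =>
              right; exact ⟨i, by omega, by simpa using heq⟩
  · rintro (⟨k, hk, hmem⟩ | ⟨j, k, hjk, hk, hcond⟩)
    · exact ⟨0, k + 1, by omega, by simpa using hk, Or.inl (by simpa using hmem)⟩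
    · refine ⟨j + 1, k + 1, by omega, by simpa using hk, ?_⟩
      rcases hcond with hmem | ⟨i, hi, heq⟩
      · rw [PySem.Set.mem_add] at hmem
        rcases hmem with h | h
        · left; simpa using h
        · right; exact ⟨0, by omega, by simpa using h.symm⟩
      · right; exact ⟨i + 1, by omega, by simpa using heq⟩

theorem bLoop_eq_true_iff (l : List Int) (seen : PySem.Set Int) :
    bLoop seen l = true ↔ ¬ ExAP l seen := by
  induction l generalizing seen with
  | nil => simp [bLoop, ExAP]
  | cons x rest ih =>
      simp only [bLoop]
      by_cases hany : rest.any (fun y => PySem.Set.contains seen (2 * x - y)) = true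
      · simp only [hany, if_true]
        simp only [List.any_eq_true, PySem.Set.contains_iff] at hany
        have hex : ExAP (x :: rest) seen :=
          (ExAP_cons x rest seen).mpr (Or.inl ((any_getD rest).mp hany))
        simp [hex]
      · rw [if_neg hany, ih, ExAP_cons]
        simp only [List.any_eq_true, PySem.Set.contains_iff] at hany
        have hno : ¬ ∃ k, k < rest.length ∧ 2 * x - rest.getD k 0 ∈ seen :=
          fun hk => hany ((any_getD rest).mpr hk)
        constructor
        · rintro hb (h | h)
          · exact hno h
          · exact hb h
        · exact fun hb h => hb (Or.inr h)

theorem isap_alt_eq_true_iff (sequ : List Int) : isap_alt sequ = true ↔ ¬ HasAP sequ := by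
  unfold isap_alt
  rw [bLoop_eq_true_iff]
  constructor
  · intro h hap
    obtain ⟨i, j, k, hij, hjk, hk, heq⟩ := hap
    exact h ⟨j, k, hjk, hk, Or.inr ⟨i, hij, by omega⟩⟩
  · intro h hex
    obtain ⟨j, k, hjk, hk, hcond⟩ := hex
    rcases hcond with hmem | ⟨i, hi, heq⟩
    · simp [PySem.Set.empty] at hmem
    · exact h ⟨i, j, k, hi, hjk, hk, by omega⟩

-- ===== VERDICT (by name: the statement is the Claim_ definition above) =====
theorem isap_spec : Claim_equal_isap := by
  intro sequ _
  unfold Spec_isap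
  have h1 := isap_eq_true_iff sequ
  have h2 := isap_alt_eq_true_iff sequ
  cases ha : isap sequ <;> cases hb : isap_alt sequ <;> simp_all
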